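-- pv_equiv track=rewrite | github.com/Owl0716/CCC_Project | CCC_Junior/Scripts/2000/P2_2000B.py | is_mirror_number
-- ===== SOURCE A (Python) =====
-- def is_mirror_number(num):
--     mirror_map = {'0':'0','1': '1', '6': '9', '8': '8', '9': '6'}
--     s = str(num)
--
--     # Build the mirrored reversed string
--     mirrored = ""
--     for ch in reversed(s):
--         if ch not in mirror_map:
--             return False
--         mirrored += mirror_map[ch]
--     return mirrored == s
-- ===== SOURCE B (Python) =====
-- def is_mirror_number(num):
--     mirror_map = {'0': '0', '1': '1', '6': '9', '8': '8', '9': '6'}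
--     s = str(num)
--     n = len(s)
--     for i in range(n):
--         ch = s[i]
--         if ch not in mirror_map or mirror_map[ch] != s[n - 1 - i]:
--             return False
--     return True
-- ===== Notes on version B (the rewrite author's own statement) =====
-- stated objective: simpler
-- what changed: Instead of building the mirrored reversal as a new string and comparing it to s, B compares symmetric positions in place: for each index i it checks that s[i] is mirrorable and that its mirror equals s[n-1-i], so no intermediate string is ever constructed.
import Mathlib
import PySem

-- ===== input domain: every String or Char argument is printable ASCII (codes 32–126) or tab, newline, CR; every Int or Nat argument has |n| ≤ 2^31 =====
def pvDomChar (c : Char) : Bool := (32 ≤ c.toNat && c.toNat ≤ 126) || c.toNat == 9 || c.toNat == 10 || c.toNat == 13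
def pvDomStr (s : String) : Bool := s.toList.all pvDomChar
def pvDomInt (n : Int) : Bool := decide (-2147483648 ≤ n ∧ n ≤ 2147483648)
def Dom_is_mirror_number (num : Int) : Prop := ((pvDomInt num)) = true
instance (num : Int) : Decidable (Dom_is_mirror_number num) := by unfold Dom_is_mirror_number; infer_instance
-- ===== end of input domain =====

-- B compares symmetric positions in place instead of building the mirrored string (objective: simpler).

-- shared helper: the dict lookup mirror_map.get(ch) (none = 'ch not in mirror_map')
def mirrorGet? (c : Char) : Option Char :=
  if c = '0' then some '0'
  else if c = '1' then some '1'
  else if c = '6' then some '9'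
  else if c = '8' then some '8'
  else if c = '9' then some '6'
  else none

-- ===== PORT A =====
-- A's loop over reversed(s): early-return False on an unmapped char (none), else
-- accumulate the mapped chars in order (mirrored += mirror_map[ch]).
def mirrorBuild : List Char → Option (List Char)
  | [] => some []
  | c :: rest =>
    match mirrorGet? c with
    | none => none
    | some mc =>
      match mirrorBuild rest with
      | none => none
      | some t => some (mc :: t)

def is_mirror_number (num : Int) : Bool :=
  let s := (PySem.Int.toStr num).toList
  match mirrorBuild s.reverse with
  | none => false
  | some mirrored => mirrored = s

-- ===== PORT B =====
-- B: for i in range(n): if s[i] not in mirror_map or mirror_map[s[i]] != s[n-1-i]: return False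
def is_mirror_number_alt (num : Int) : Bool :=
  let s := (PySem.Int.toStr num).toList
  let n := s.length
  (List.range n).all (fun i =>
    match mirrorGet? (s.getD i ' ') with
    | none => false
    | some mc => mc = s.getD (n - 1 - i) ' ')

-- ===== PRECONDITION & SPEC =====
def Spec_is_mirror_number (num : Int) (out : Bool) : Prop := out = is_mirror_number_alt num
instance (num : Int) (out : Bool) : Decidable (Spec_is_mirror_number num out) := by unfold Spec_is_mirror_number; infer_instance

-- ===== CLAIM (what is proved, stated in full; the proofs are below) =====
def Claim_equal_is_mirror_number : Prop := ∀ (num : Int), Dom_is_mirror_number num → Spec_is_mirror_number num (is_mirror_number num)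

-- ===== LEMMAS AND PROOFS =====

-- characterisation of A's builder
theorem mirrorBuild_eq_some (l m : List Char) :
    mirrorBuild l = some m ↔
      m.length = l.length ∧ ∀ j, j < l.length → mirrorGet? (l.getD j ' ') = some (m.getD j ' ') := by
  induction l generalizing m with
  | nil =>
    simp only [mirrorBuild, List.length_nil]
    constructor
    · rintro h; cases h; simp
    · intro h
      have := List.eq_nil_of_length_eq_zero h.1
      simp [this]
  | cons c rest ih =>
    simp only [mirrorBuild]
    cases hg : mirrorGet? c with
    | none =>
      simp only []
      constructor
      · intro h; cases h
      · rintro ⟨hl, hall⟩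
        have := hall 0 (by simp)
        simp [hg] at this
    | some mc =>
      cases hb : mirrorBuild rest with
      | none =>
        simp only []
        constructor
        · intro h; cases h
        · rintro ⟨hl, hall⟩
          cases m with
          | nil => simp at hl
          | cons m0 mrest =>
            have : mirrorBuild rest = some mrest := by
              rw [ih]
              refine ⟨by simpa using hl, ?_⟩
              intro j hj
              have := hall (j + 1) (by simpa using Nat.succ_lt_succ hj)
              simpa using this
            rw [hb] at this; cases this
      | some t =>
        simp only []
        constructor
        · intro h
          cases h
          have := (ih t).mp hb
          refine ⟨by simpa using this.1, ?_⟩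
          intro j hj
          cases j with
          | zero => simpa using hg
          | succ k =>
            have hk : k < rest.length := by simpa using Nat.lt_of_succ_lt_succ hj
            have := this.2 k hk
            simpa using this
        · rintro ⟨hl, hall⟩
          cases m with
          | nil => simp at hl
          | cons m0 mrest =>
            have h0 := hall 0 (by simp)
            simp [hg] at h0
            have hrest : mirrorBuild rest = some mrest := by
              rw [ih]
              refine ⟨by simpa using hl, ?_⟩
              intro j hj
              have := hall (j + 1) (by simpa using Nat.succ_lt_succ hj)
              simpa using this
            rw [hb] at hrest
            cases hrest
            simp [h0]

theorem getD_reverse (s : List Char) (j : Nat) (hj : j < s.length) :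
    s.reverse.getD j ' ' = s.getD (s.length - 1 - j) ' ' := by
  have hj' : j < s.reverse.length := by simpa using hj
  have hk : s.length - 1 - j < s.length := by omega
  rw [List.getD_eq_getElem _ _ hj', List.getD_eq_getElem _ _ hk, List.getElem_reverse]

-- A = true  ↔  the reverse-side pairwise condition
theorem portA_iff (s : List Char) :
    (match mirrorBuild s.reverse with
     | none => false
     | some mirrored => (mirrored = s : Bool)) = true ↔
      ∀ j, j < s.length → mirrorGet? (s.getD (s.length - 1 - j) ' ') = some (s.getD j ' ') := by
  constructor
  · intro h
    cases hb : mirrorBuild s.reverse with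
    | none => rw [hb] at h; simp at h
    | some m =>
      rw [hb] at h
      simp only [decide_eq_true_eq] at h
      have hb' : mirrorBuild s.reverse = some s := h ▸ hb
      have := (mirrorBuild_eq_some s.reverse s).mp hb'
      intro j hj
      have hj' : j < s.reverse.length := by simpa using hj
      have h2 := this.2 j hj'
      rwa [getD_reverse s j hj] at h2
  · intro hall
    have hsome : mirrorBuild s.reverse = some s := by
      rw [mirrorBuild_eq_some]
      refine ⟨by simp, ?_⟩
      intro j hj
      have hj' : j < s.length := by simpa using hj
      rw [getD_reverse s j hj']
      exact hall j hj'
    rw [hsome]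
    simp

-- B = true  ↔  the forward-side pairwise condition
theorem portB_iff (s : List Char) :
    ((List.range s.length).all (fun i =>
      match mirrorGet? (s.getD i ' ') with
      | none => false
      | some mc => (mc = s.getD (s.length - 1 - i) ' ' : Bool))) = true ↔
      ∀ i, i < s.length → mirrorGet? (s.getD i ' ') = some (s.getD (s.length - 1 - i) ' ') := by
  rw [List.all_eq_true]
  constructor
  · intro h i hi
    have := h i (List.mem_range.mpr hi)
    cases hg : mirrorGet? (s.getD i ' ') with
    | none => rw [hg] at this; simp at this
    | some mc =>
      rw [hg] at this
      simp only [decide_eq_true_eq] at this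
      rw [this]
  · intro h i hi
    have := h i (List.mem_range.mp hi)
    rw [this]
    simp

-- the two pairwise conditions are equivalent (substitute j ↦ n-1-i)
theorem cond_iff (s : List Char) :
    (∀ j, j < s.length → mirrorGet? (s.getD (s.length - 1 - j) ' ') = some (s.getD j ' ')) ↔
      ∀ i, i < s.length → mirrorGet? (s.getD i ' ') = some (s.getD (s.length - 1 - i) ' ') := by
  constructor
  · intro h i hi
    have hj : s.length - 1 - i < s.length := by omega
    have := h (s.length - 1 - i) hj
    have he : s.length - 1 - (s.length - 1 - i) = i := by omega
    rwa [he] at this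
  · intro h j hj
    have hi : s.length - 1 - j < s.length := by omega
    have := h (s.length - 1 - j) hi
    have he : s.length - 1 - (s.length - 1 - j) = j := by omega
    rwa [he] at this

theorem ports_agree (s : List Char) :
    (match mirrorBuild s.reverse with
     | none => false
     | some mirrored => (mirrored = s : Bool)) =
    ((List.range s.length).all (fun i =>
      match mirrorGet? (s.getD i ' ') with
      | none => false
      | some mc => (mc = s.getD (s.length - 1 - i) ' ' : Bool))) := by
  rw [Bool.eq_iff_iff, portA_iff, portB_iff]
  exact cond_iff s

-- ===== VERDICT (by name: the statement is the Claim_ definition above) =====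
theorem is_mirror_number_spec : Claim_equal_is_mirror_number := by
  intro num _
  show is_mirror_number num = is_mirror_number_alt num
  unfold is_mirror_number is_mirror_number_alt
  exact ports_agree _
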